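-- pv_equiv track=rewrite | github.com/Solomonwisdom/co-plan-tool-core | core.py | generate_cost1
-- ===== SOURCE A (Python) =====
-- def generate_cost1(cost_vector, todolist, cost):
--     flight_time = 0
--     cost_time = 0
--     for i in range(len(todolist)):
--         point_id = todolist[i]["point"]
--         # start point
--         if i == 0:
--             flight_time += cost_vector[point_id]
--         # mid point
--         else:
--             flight_time += cost[todolist[i - 1]["point"]][point_id]
--         if "put" in todolist[i].keys():
--             cost_time += flight_time
--     return cost_time, flight_time
-- ===== SOURCE B (Python) =====
-- def generate_cost1(cost_vector, todolist, cost):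
--     points = [d["point"] for d in todolist]
--     if points:
--         incs = [cost_vector[points[0]]] + [cost[p][q] for p, q in zip(points, points[1:])]
--     else:
--         incs = []
--     prefixes = []
--     t = 0
--     for x in incs:
--         t += x
--         prefixes.append(t)
--     cost_time = sum(p for p, d in zip(prefixes, todolist) if "put" in d)
--     return cost_time, t
-- ===== Notes on version B (the rewrite author's own statement) =====
-- stated objective: alternative
-- what changed: B separates the interleaved loop into three phases: build the per-leg increment list from consecutive point pairs, take its prefix sums, then sum the prefix values at the 'put' steps; A threads flight/cost through one indexed loop with an i==0 branch.
import Mathlib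
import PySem

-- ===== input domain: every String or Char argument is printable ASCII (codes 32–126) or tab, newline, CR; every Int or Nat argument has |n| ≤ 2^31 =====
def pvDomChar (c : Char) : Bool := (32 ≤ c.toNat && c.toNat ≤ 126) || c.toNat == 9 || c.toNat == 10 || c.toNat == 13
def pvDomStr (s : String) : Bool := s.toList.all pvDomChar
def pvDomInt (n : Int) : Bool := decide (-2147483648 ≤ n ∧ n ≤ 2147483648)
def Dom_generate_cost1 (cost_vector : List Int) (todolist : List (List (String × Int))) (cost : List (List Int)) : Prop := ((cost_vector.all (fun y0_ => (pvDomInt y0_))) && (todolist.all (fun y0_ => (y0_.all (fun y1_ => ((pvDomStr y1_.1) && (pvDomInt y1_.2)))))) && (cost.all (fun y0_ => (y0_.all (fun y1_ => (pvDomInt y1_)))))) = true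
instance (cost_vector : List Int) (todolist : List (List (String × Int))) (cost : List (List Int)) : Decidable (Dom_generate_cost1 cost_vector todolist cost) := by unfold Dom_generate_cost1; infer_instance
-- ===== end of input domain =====

-- B splits A's single interleaved indexed loop into three phases: per-leg increments from consecutive point pairs, prefix sums, then a sum of the prefixes at the 'put' steps; same cost, different decomposition.


-- shared helper: d["point"] as a total value (Pre_ guarantees the lookup succeeds)
def pvPoint (d : List (String × Int)) : Int := (d.lookup "point").getD 0

-- ===== PORT A =====
-- the body of A's for-loop, literally (st = (cost_time, flight_time), i the loop index)
def pvAbody (cost_vector : List Int) (todolist : List (List (String × Int))) (cost : List (List Int)) (st : Int × Int) (i : Int) : Int × Int :=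
  let d := PySem.List.pyGetD todolist i []
  let point_id := pvPoint d
  let flight_time :=
    if i = 0 then st.2 + PySem.List.pyGetD cost_vector point_id 0
    else st.2 + PySem.List.pyGetD (PySem.List.pyGetD cost (pvPoint (PySem.List.pyGetD todolist (i - 1) [])) []) point_id 0
  let cost_time := if (d.lookup "put").isSome then st.1 + flight_time else st.1
  (cost_time, flight_time)

def generate_cost1 (cost_vector : List Int) (todolist : List (List (String × Int))) (cost : List (List Int)) : Int × Int :=
  (PySem.List.pyRange 0 (todolist.length : Int) 1).foldl (pvAbody cost_vector todolist cost) ((0 : Int), (0 : Int))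

-- ===== PORT B =====
def generate_cost1_alt (cost_vector : List Int) (todolist : List (List (String × Int))) (cost : List (List Int)) : Int × Int :=
  let points := todolist.map pvPoint
  let incs : List Int :=
    match points with
    | [] => []
    | p0 :: _ =>
        PySem.List.pyGetD cost_vector p0 0 ::
          (points.zip points.tail).map (fun pq => PySem.List.pyGetD (PySem.List.pyGetD cost pq.1 []) pq.2 0)
  let r := incs.foldl (fun (acc : List Int × Int) x => (acc.1 ++ [acc.2 + x], acc.2 + x)) (([] : List Int), (0 : Int))
  let cost_time := (((r.1.zip todolist).filter (fun pd => (pd.2.lookup "put").isSome)).map (·.1)).sum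
  (cost_time, r.2)

-- ===== PRECONDITION & SPEC =====
-- Pre_: exactly the inputs where the Python A raises nothing — every step dict has a "point"
-- key, the first point is a valid (possibly negative) index into cost_vector, and every
-- consecutive pair of points indexes validly into cost and into the selected row.
def Pre_generate_cost1 (cost_vector : List Int) (todolist : List (List (String × Int))) (cost : List (List Int)) : Prop :=
  (∀ d ∈ todolist, (d.lookup "point").isSome = true) ∧
  (∀ p ∈ (todolist.map pvPoint).take 1, PySem.Raise.InRange cost_vector.length p) ∧
  (∀ pq ∈ (todolist.map pvPoint).zip (todolist.map pvPoint).tail,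
      PySem.Raise.InRange cost.length pq.1 ∧
      PySem.Raise.InRange (PySem.List.pyGetD cost pq.1 []).length pq.2)
instance (cost_vector : List Int) (todolist : List (List (String × Int))) (cost : List (List Int)) : Decidable (Pre_generate_cost1 cost_vector todolist cost) := by unfold Pre_generate_cost1; infer_instance

def pvWitness_generate_cost1 : List Int × (List (List (String × Int))) × List (List Int) :=
  ([3, 5], [[("point", 1), ("put", 1)], [("point", 0)]], [[7, 2], [4, 1]])

def Spec_generate_cost1 (cost_vector : List Int) (todolist : List (List (String × Int))) (cost : List (List Int)) (out : Int × Int) : Prop := out = generate_cost1_alt cost_vector todolist cost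
instance (cost_vector : List Int) (todolist : List (List (String × Int))) (cost : List (List Int)) (out : Int × Int) : Decidable (Spec_generate_cost1 cost_vector todolist cost out) := by unfold Spec_generate_cost1; infer_instance

-- ===== CLAIM (what is proved, stated in full; the proofs are below) =====
def Claim_equal_generate_cost1 : Prop := ∀ (cost_vector : List Int) (todolist : List (List (String × Int))) (cost : List (List Int)), Dom_generate_cost1 cost_vector todolist cost → Pre_generate_cost1 cost_vector todolist cost → Spec_generate_cost1 cost_vector todolist cost (generate_cost1 cost_vector todolist cost)

-- ===== LEMMAS AND PROOFS =====

-- reference recursion: walk the remaining steps threading (cost_time, flight_time), p = previous point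
def pvLoop (cost : List (List Int)) (p : Int) (ds : List (List (String × Int))) (st : Int × Int) : Int × Int :=
  match ds with
  | [] => st
  | d :: ds' =>
      let q := pvPoint d
      let ft := st.2 + PySem.List.pyGetD (PySem.List.pyGetD cost p []) q 0
      pvLoop cost q ds' (if (d.lookup "put").isSome then st.1 + ft else st.1, ft)

-- prefix sums of an increment list starting from t
def pvPref (incs : List Int) (t : Int) : List Int :=
  match incs with
  | [] => []
  | x :: xs => (t + x) :: pvPref xs (t + x)

-- the per-leg increments of the tail, given the previous point p
def pvIncs (cost : List (List Int)) (p : Int) (ds : List (List (String × Int))) : List Int :=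
  ((p :: ds.map pvPoint).zip (ds.map pvPoint)).map
    (fun pq => PySem.List.pyGetD (PySem.List.pyGetD cost pq.1 []) pq.2 0)

theorem pvIncs_cons (cost : List (List Int)) (p : Int) (d : List (String × Int)) (ds : List (List (String × Int))) :
    pvIncs cost p (d :: ds) = PySem.List.pyGetD (PySem.List.pyGetD cost p []) (pvPoint d) 0 :: pvIncs cost (pvPoint d) ds := by
  cases ds <;> simp [pvIncs]

-- B's prefix-building fold, characterised
theorem pvFold_char (incs : List Int) (pref0 : List Int) (t : Int) :
    incs.foldl (fun (acc : List Int × Int) x => (acc.1 ++ [acc.2 + x], acc.2 + x)) (pref0, t)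
      = (pref0 ++ pvPref incs t, t + incs.sum) := by
  induction incs generalizing pref0 t with
  | nil => simp [pvPref]
  | cons x xs ih => simp [pvPref, ih, List.append_assoc]; ring

-- the threaded accumulation equals "sum of selected prefix sums"
theorem pvLoop_char (cost : List (List Int)) (ds : List (List (String × Int))) (p : Int) (ct ft : Int) :
    pvLoop cost p ds (ct, ft)
      = (ct + ((((pvPref (pvIncs cost p ds) ft).zip ds).filter (fun pd => (pd.2.lookup "put").isSome)).map (·.1)).sum,
         ft + (pvIncs cost p ds).sum) := by
  induction ds generalizing p ct ft with
  | nil => simp [pvLoop, pvIncs]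
  | cons d ds ih =>
      rw [pvIncs_cons]
      simp only [pvLoop, pvPref, List.zip_cons_cons, List.filter_cons, List.sum_cons]
      rw [ih]
      by_cases h : (d.lookup "put").isSome
      · simp only [h, if_true]
        refine Prod.ext ?_ ?_ <;> simp <;> ring
      · simp only [h]
        refine Prod.ext ?_ ?_ <;> simp
        ring

-- A's indexed loop over the suffix ds (pre = already-processed prefix, nonempty) equals pvLoop
theorem pvA_suffix (cost_vector : List Int) (cost : List (List Int))
    (ds pre : List (List (String × Int))) (hpre : pre ≠ []) (st : Int × Int) :
    (PySem.List.pyRange (pre.length : Int) (((pre ++ ds).length : Nat) : Int) 1).foldl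
        (pvAbody cost_vector (pre ++ ds) cost) st
      = pvLoop cost (pvPoint (pre.getLast hpre)) ds st := by
  induction ds generalizing pre st with
  | nil =>
      rw [PySem.List.pyRange_one_eq_nil (by simp)]
      rfl
  | cons d ds ih =>
      have hlen : 0 < pre.length := List.length_pos_iff.mpr hpre
      have hlt : (pre.length : Int) < (((pre ++ d :: ds).length : Nat) : Int) := by
        simp
      rw [PySem.List.pyRange_one_cons hlt, List.foldl_cons]
      have hget : PySem.List.pyGetD (pre ++ d :: ds) ((pre.length : Nat) : Int) [] = d := by
        rw [PySem.List.pyGetD_natCast]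
        simp [List.getD_eq_getElem?_getD]
      have hprev : PySem.List.pyGetD (pre ++ d :: ds) (((pre.length : Nat) : Int) - 1) [] = pre.getLast hpre := by
        have h1 : (((pre.length : Nat) : Int) - 1) = ((pre.length - 1 : Nat) : Int) := by
          push_cast [Nat.cast_sub hlen]; ring
        rw [h1, PySem.List.pyGetD_natCast, List.getD_eq_getElem?_getD,
          List.getElem?_append_left (by omega)]
        simp [List.getLast_eq_getElem, List.getElem?_eq_getElem (by omega : pre.length - 1 < pre.length)]
      have hstep : pvAbody cost_vector (pre ++ d :: ds) cost st ((pre.length : Nat) : Int)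
          = (if (d.lookup "put").isSome
              then st.1 + (st.2 + PySem.List.pyGetD (PySem.List.pyGetD cost (pvPoint (pre.getLast hpre)) []) (pvPoint d) 0)
              else st.1,
             st.2 + PySem.List.pyGetD (PySem.List.pyGetD cost (pvPoint (pre.getLast hpre)) []) (pvPoint d) 0) := by
        have hne : ¬ (((pre.length : Nat) : Int) = 0) := by
          exact_mod_cast Nat.pos_iff_ne_zero.mp hlen
        simp only [pvAbody, hget, hprev]
        rw [if_neg hne]
      rw [hstep]
      have hlist : pre ++ d :: ds = (pre ++ [d]) ++ ds := by simp
      have hlen2 : (pre.length : Int) + 1 = (((pre ++ [d]).length : Nat) : Int) := by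
        simp
      rw [hlist, hlen2, ih (pre ++ [d]) (by simp)]
      have hlast : (pre ++ [d]).getLast (by simp) = d := by simp
      rw [hlast]
      simp [pvLoop]

-- B unfolded on a nonempty todolist
theorem pvB_cons (cost_vector : List Int) (cost : List (List Int)) (d : List (String × Int)) (ds : List (List (String × Int))) :
    generate_cost1_alt cost_vector (d :: ds) cost
      = (((((PySem.List.pyGetD cost_vector (pvPoint d) 0 ::
              pvPref (pvIncs cost (pvPoint d) ds) (PySem.List.pyGetD cost_vector (pvPoint d) 0)).zip
              (d :: ds)).filter (fun pd => (pd.2.lookup "put").isSome)).map (·.1)).sum,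
         PySem.List.pyGetD cost_vector (pvPoint d) 0 + (pvIncs cost (pvPoint d) ds).sum) := by
  simp only [generate_cost1_alt, List.map_cons]
  rw [List.foldl_cons, pvFold_char]
  have hz : ((pvPoint d :: ds.map pvPoint).zip (pvPoint d :: ds.map pvPoint).tail)
      = (pvPoint d :: ds.map pvPoint).zip (ds.map pvPoint) := by
    simp
  simp only [hz, List.nil_append, zero_add]
  congr 2

-- ===== VERDICT (by name: the statement is the Claim_ definition above) =====
theorem generate_cost1_spec : Claim_equal_generate_cost1 := by
  intro cost_vector todolist cost _ _
  unfold Spec_generate_cost1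
  cases todolist with
  | nil => rfl
  | cons d ds =>
      rw [pvB_cons]
      unfold generate_cost1
      have h0 : (0 : Int) < (((d :: ds).length : Nat) : Int) := by simp
      rw [PySem.List.pyRange_one_cons h0, List.foldl_cons]
      have hstep : pvAbody cost_vector (d :: ds) cost ((0 : Int), (0 : Int)) 0
          = (if (d.lookup "put").isSome then PySem.List.pyGetD cost_vector (pvPoint d) 0 else 0,
             PySem.List.pyGetD cost_vector (pvPoint d) 0) := by
        have hd : PySem.List.pyGetD (d :: ds) (0 : Int) [] = d := by
          simp [PySem.List.pyGetD_zero]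
        simp only [pvAbody]
        rw [hd]
        simp
      rw [hstep]
      have hpre : ((0 : Int) + 1) = (([d].length : Nat) : Int) := by simp
      have hlist : (d :: ds : List (List (String × Int))) = [d] ++ ds := by simp
      rw [hpre]
      conv_lhs => rw [hlist]
      rw [pvA_suffix cost_vector cost ds [d] (by simp), pvLoop_char]
      have hlast : ([d] : List (List (String × Int))).getLast (by simp) = d := by simp
      rw [hlast]
      simp only [List.zip_cons_cons, List.filter_cons]
      by_cases h : (d.lookup "put").isSome
      · simp only [h, if_true]
        refine Prod.ext ?_ ?_ <;> simp <;> ring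
      · simp only [h]
        refine Prod.ext ?_ ?_ <;> simp
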